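-- pv_equiv track=rewrite | github.com/FaizAther/GPR-Analytics | code/Environments/sql_database/populate.py | pop_grade
-- ===== SOURCE A (Python) =====
-- def pop_grade(enrolment_id_list,assessment_list):
--     list = []
--     num = len(enrolment_id_list)
--     for i in range(num):
--         total_assessment_score = assessment_list[i][4]
--         # determine the gpa
--         if total_assessment_score < 20:
--             grade = 1
--         if total_assessment_score >= 20 and total_assessment_score < 45:
--             grade = 2
--         if total_assessment_score >= 45 and total_assessment_score < 50:
--             grade = 3
--         if total_assessment_score >= 50 and total_assessment_score < 65:
--             grade = 4
--         if total_assessment_score >= 65 and total_assessment_score < 75: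
--             grade = 5
--         if total_assessment_score >= 75 and total_assessment_score < 85:
--             grade = 6
--         if total_assessment_score >= 85:
--             grade = 7
--
--         if grade <= 3:
--             at_risk = 1 # 0 is false, 1 is true
--         if grade > 3:
--             at_risk = 0
--
--         entry = (assessment_list[i][0], grade, at_risk)
--         list.append(entry)
--
--     return list
-- ===== SOURCE B (Python) =====
-- THRESHOLDS = (20, 45, 50, 65, 75, 85)
--
--
-- def _classify(row):
--     score = row[4]
--     grade = 1 + sum(1 for t in THRESHOLDS if score >= t)
--     return (row[0], grade, 1 if grade <= 3 else 0)
--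
--
-- def pop_grade(enrolment_id_list, assessment_list):
--     return [_classify(row) for row in assessment_list[:len(enrolment_id_list)]]
-- ===== Notes on version B (the rewrite author's own statement) =====
-- stated objective: idiomatic
-- what changed: Replaces the seven-branch if cascade that overwrites a grade variable with a table lookup (count of thresholds <= score in a constant sorted list) and replaces the index loop with append by a comprehension over a slice of assessment_list.
-- outside the precondition, e.g. on pop_grade([1], []): A raises IndexError, B returns []; on pop_grade([1], [[7, 0]]): A raises IndexError, B raises IndexError
import Mathlib
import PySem

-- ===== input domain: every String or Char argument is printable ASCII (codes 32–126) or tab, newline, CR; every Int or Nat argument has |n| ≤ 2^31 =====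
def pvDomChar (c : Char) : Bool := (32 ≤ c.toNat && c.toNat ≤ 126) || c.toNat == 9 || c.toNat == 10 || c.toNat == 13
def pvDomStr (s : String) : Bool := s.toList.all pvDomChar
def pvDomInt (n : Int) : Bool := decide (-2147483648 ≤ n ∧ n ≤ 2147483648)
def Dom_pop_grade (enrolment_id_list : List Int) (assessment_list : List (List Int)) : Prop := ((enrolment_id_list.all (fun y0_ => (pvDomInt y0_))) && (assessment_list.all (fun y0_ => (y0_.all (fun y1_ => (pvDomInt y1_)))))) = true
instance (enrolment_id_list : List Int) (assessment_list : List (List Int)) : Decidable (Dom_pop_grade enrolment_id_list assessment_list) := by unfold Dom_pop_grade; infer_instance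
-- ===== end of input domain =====

-- B replaces A's seven-branch if-cascade by a count of passed thresholds in a constant
-- sorted table and builds the result as a map over a slice instead of an index loop (idiomatic).

-- ===== PORT A =====
-- literal transliteration: loop over range(len(enrolment_id_list)), sequential ifs
-- overwriting grade/at_risk (indexing via pyGetD, in range under Pre_)
def pop_grade (enrolment_id_list : List Int) (assessment_list : List (List Int)) : List (Int × Int × Int) :=
  (PySem.List.pyRange 0 (enrolment_id_list.length : Int) 1).foldl
    (fun lst i =>
      let s := PySem.List.pyGetD (PySem.List.pyGetD assessment_list i []) 4 0
      let g : Int := if s < 20 then 1 else 0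
      let g : Int := if 20 ≤ s ∧ s < 45 then 2 else g
      let g : Int := if 45 ≤ s ∧ s < 50 then 3 else g
      let g : Int := if 50 ≤ s ∧ s < 65 then 4 else g
      let g : Int := if 65 ≤ s ∧ s < 75 then 5 else g
      let g : Int := if 75 ≤ s ∧ s < 85 then 6 else g
      let g : Int := if 85 ≤ s then 7 else g
      let r : Int := if g ≤ 3 then 1 else 0
      let r : Int := if 3 < g then 0 else r
      lst ++ [(PySem.List.pyGetD (PySem.List.pyGetD assessment_list i []) 0 0, g, r)])
    []

-- ===== PORT B =====
def pvThresholds : List Int := [20, 45, 50, 65, 75, 85]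

def pvClassify (row : List Int) : Int × Int × Int :=
  let score := PySem.List.pyGetD row 4 0
  let grade : Int := 1 + ((pvThresholds.countP (fun t => t ≤ score)) : Int)
  (PySem.List.pyGetD row 0 0, grade, if grade ≤ 3 then 1 else 0)

def pop_grade_alt (enrolment_id_list : List Int) (assessment_list : List (List Int)) : List (Int × Int × Int) :=
  (PySem.List.slice assessment_list none (some (enrolment_id_list.length : Int))).map pvClassify

-- ===== PRECONDITION & SPEC =====
-- Pre_ excludes exactly the inputs where A raises IndexError: a missing row
-- assessment_list[i] or a row shorter than 5 for some i < len(enrolment_id_list).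
def Pre_pop_grade (enrolment_id_list : List Int) (assessment_list : List (List Int)) : Prop :=
  enrolment_id_list.length ≤ assessment_list.length ∧
    ∀ row ∈ assessment_list.take enrolment_id_list.length, 5 ≤ row.length
instance (enrolment_id_list : List Int) (assessment_list : List (List Int)) : Decidable (Pre_pop_grade enrolment_id_list assessment_list) := by unfold Pre_pop_grade; infer_instance
def pvWitness_pop_grade : List Int × List (List Int) := ([1, 2], [[10, 0, 0, 0, 19], [11, 0, 0, 0, 85]])

def Spec_pop_grade (enrolment_id_list : List Int) (assessment_list : List (List Int)) (out : List (Int × Int × Int)) : Prop := out = pop_grade_alt enrolment_id_list assessment_list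
instance (enrolment_id_list : List Int) (assessment_list : List (List Int)) (out : List (Int × Int × Int)) : Decidable (Spec_pop_grade enrolment_id_list assessment_list out) := by unfold Spec_pop_grade; infer_instance

-- ===== CLAIM (what is proved, stated in full; the proofs are below) =====
def Claim_equal_pop_grade : Prop := ∀ (enrolment_id_list : List Int) (assessment_list : List (List Int)), Dom_pop_grade enrolment_id_list assessment_list → Pre_pop_grade enrolment_id_list assessment_list → Spec_pop_grade enrolment_id_list assessment_list (pop_grade enrolment_id_list assessment_list)
-- ===== LEMMAS AND PROOFS =====

-- A's grade cascade (zeta-reduced form) equals B's count of passed thresholds.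
set_option maxHeartbeats 1000000 in
lemma grade_eq (s : Int) :
    (if 85 ≤ s then (7 : Int) else
      if 75 ≤ s ∧ s < 85 then 6 else
        if 65 ≤ s ∧ s < 75 then 5 else
          if 50 ≤ s ∧ s < 65 then 4 else
            if 45 ≤ s ∧ s < 50 then 3 else
              if 20 ≤ s ∧ s < 45 then 2 else
                if s < 20 then 1 else 0) = 1 + ((pvThresholds.countP (fun t => t ≤ s)) : Int) := by
  simp only [pvThresholds, List.countP_cons, List.countP_nil, decide_eq_true_eq]
  split_ifs <;> omega

-- A's two at-risk ifs collapse to B's single one.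
lemma risk_eq (g : Int) : (if 3 < g then (0 : Int) else if g ≤ 3 then 1 else 0) = if g ≤ 3 then 1 else 0 := by
  split_ifs <;> omega

lemma pop_grade_eq_map (enrolment_id_list : List Int) (assessment_list : List (List Int))
    (h : enrolment_id_list.length ≤ assessment_list.length) :
    pop_grade enrolment_id_list assessment_list =
      (assessment_list.take enrolment_id_list.length).map pvClassify := by
  unfold pop_grade
  set n := enrolment_id_list.length with hn
  clear_value n; clear hn
  induction n with
  | zero => simp [PySem.List.pyRange_one_eq_nil]
  | succ m ih =>
    have hm : m ≤ assessment_list.length := Nat.le_of_succ_le h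
    have hmlt : m < assessment_list.length := h
    rw [show ((m + 1 : Nat) : Int) = (m : Int) + 1 by push_cast; ring,
        PySem.List.pyRange_one_succ_right (by positivity), List.foldl_append, ih hm]
    have hget : PySem.List.pyGetD assessment_list (m : Int) [] = assessment_list[m]'(hmlt) := by
      rw [PySem.List.pyGetD_natCast]
      simp [List.getD, List.getElem?_eq_getElem hmlt]
    rw [List.take_succ_eq_append_getElem hmlt, List.map_append]
    simp only [List.foldl_cons, List.foldl_nil, List.map_cons, List.map_nil, hget]
    congr 1
    rw [risk_eq, grade_eq]
    simp [pvClassify]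

-- ===== VERDICT (by name: the statement is the Claim_ definition above) =====
theorem pop_grade_spec : Claim_equal_pop_grade := by
  intro e a _ hpre
  unfold Spec_pop_grade pop_grade_alt
  rw [PySem.List.slice_to_natCast, pop_grade_eq_map e a hpre.1]
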